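-- pv_equiv track=rewrite | github.com/goodminjeong/programmers | week003/01_find_number.py | solution
-- ===== SOURCE A (Python) =====
-- def solution(num, k):
--     answer = 0
--     num_list = list(map(int, str(num)))  # 정수형인 num을 리스트로 변환
--     for number in num_list:             # 리스트가 된 num_list를 for문에 돌려 값을 하나씩 꺼냄
--         answer += 1                     # for문을 한 번씩 돌 때마다 1을 더해줌->자릿수가 됨
--         if k in num_list:               # num_list에 매개변수 k가 있는 경우
--             if number == k:             # num_list 속 number와 k가 같으면
--                 return answer           # answer 반환(자릿수)
--         else:                           # num_list에 매개변수 k가 없는 경우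
--             return -1                   # -1을 반환함
-- ===== SOURCE B (Python) =====
-- def solution(num, k):
--     num_list = list(map(int, str(num)))  # kept verbatim: same ValueError on negative num
--     first = {}
--     for i, d in enumerate(num_list):
--         if d not in first:
--             first[d] = i + 1
--     return first.get(k, -1)
-- ===== Notes on version B (the rewrite author's own statement) =====
-- stated objective: alternative
-- what changed: Replaces the loop with a per-iteration 'k in num_list' membership scan and early returns by building a first-occurrence index table (dict) in one pass and finishing with a single dict lookup with default -1.
import Mathlib
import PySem

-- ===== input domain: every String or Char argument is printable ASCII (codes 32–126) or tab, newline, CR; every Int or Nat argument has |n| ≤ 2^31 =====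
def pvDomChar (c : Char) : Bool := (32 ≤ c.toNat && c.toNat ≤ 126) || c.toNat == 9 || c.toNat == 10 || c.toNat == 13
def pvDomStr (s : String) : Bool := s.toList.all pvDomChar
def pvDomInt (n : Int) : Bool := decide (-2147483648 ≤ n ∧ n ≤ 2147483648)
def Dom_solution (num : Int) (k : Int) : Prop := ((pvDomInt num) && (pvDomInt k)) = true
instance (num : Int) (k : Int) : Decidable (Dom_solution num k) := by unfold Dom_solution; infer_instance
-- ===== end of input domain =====

-- B replaces A's per-iteration membership scan + early returns by a first-occurrence
-- index table built in one pass followed by a single dict lookup (alternative decomposition).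


-- ===== PORT A =====
-- num_list = list(map(int, str(num))): exact for 0 ≤ num (Pre_), where str(num) is all
-- decimal digits and int(c) = code - 48; for num < 0 Python raises ValueError (outside Pre_).
def digitsOf (num : Int) : List Int :=
  (PySem.Int.toChars num).map (fun c => ((c.toNat : Int) - 48))

-- the for-loop of A; the [] case (Python falling off the loop) is unreachable: str(num) ≠ ''
def solutionGo (nl : List Int) (k : Int) : List Int → Int → Int
  | [], _ => 0
  | n :: rest, answer =>
    let answer := answer + 1
    if nl.contains k then
      if n = k then answer else solutionGo nl k rest answer
    else -1

def solution (num : Int) (k : Int) : Int :=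
  let num_list := digitsOf num
  solutionGo num_list k num_list 0

-- ===== PORT B =====
def solution_alt (num : Int) (k : Int) : Int :=
  let num_list := digitsOf num
  let first := (PySem.List.enumerate num_list 0).foldl
      (fun d p => if d.contains p.2 then d else d.insert p.2 (p.1 + 1)) PySem.Dict.empty
  first.getD k (-1)

-- ===== PRECONDITION & SPEC =====
-- Pre_ excludes exactly num < 0, where Python's int('-') raises ValueError in both programs.
def Pre_solution (num : Int) (k : Int) : Prop := 0 ≤ num
instance (num : Int) (k : Int) : Decidable (Pre_solution num k) := by unfold Pre_solution; infer_instance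
def pvWitness_solution : Int × Int := (12345, 3)

def Spec_solution (num : Int) (k : Int) (out : Int) : Prop := out = solution_alt num k
instance (num : Int) (k : Int) (out : Int) : Decidable (Spec_solution num k out) := by unfold Spec_solution; infer_instance

-- ===== CLAIM (what is proved, stated in full; the proofs are below) =====
def Claim_equal_solution : Prop := ∀ (num : Int) (k : Int), Dom_solution num k → Pre_solution num k → Spec_solution num k (solution num k)

-- ===== LEMMAS AND PROOFS =====

-- 1-based position of the first occurrence of k, offset by base; -1 if absent
def firstPos (k : Int) : List Int → Int → Int
  | [], _ => -1
  | d :: rest, base => if d = k then base + 1 else firstPos k rest (base + 1)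

lemma toDigitsCore_len_le (b : Nat) : ∀ (f n : Nat) (acc : List Char),
    acc.length ≤ (Nat.toDigitsCore b f n acc).length := by
  intro f
  induction f with
  | zero => intro n acc; simp [Nat.toDigitsCore]
  | succ f ih =>
    intro n acc
    simp only [Nat.toDigitsCore]
    split
    · simp
    · exact le_trans (by simp) (ih _ _)

lemma toDigits_ne_nil (b n : Nat) : Nat.toDigits b n ≠ [] := by
  unfold Nat.toDigits
  simp only [Nat.toDigitsCore]
  split
  · simp
  · intro h
    have := toDigitsCore_len_le b n (n / b) [Nat.digitChar (n % b)]
    rw [h] at this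
    simp at this

lemma digitsOf_ne_nil (num : Int) : digitsOf num ≠ [] := by
  unfold digitsOf PySem.Int.toChars
  split
  · simp
  · simp [toDigits_ne_nil]

lemma solutionGo_eq_firstPos (nl : List Int) (k : Int) (hk : nl.contains k = true) :
    ∀ (suffix : List Int) (ans : Int), k ∈ suffix →
      solutionGo nl k suffix ans = firstPos k suffix ans := by
  intro suffix
  induction suffix with
  | nil => intro ans h; cases h
  | cons n rest ih =>
    intro ans h
    simp only [solutionGo, firstPos, hk, if_true]
    by_cases hn : n = k
    · simp [hn]
    · have hmem : k ∈ rest := by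
        rcases List.mem_cons.mp h with h' | h'
        · exact absurd h'.symm hn
        · exact h'
      simp [hn, ih (ans + 1) hmem]

lemma fold_first_getD (k : Int) : ∀ (ds : List Int) (d : PySem.Dict Int Int) (i : Int),
    ((PySem.List.enumerate ds i).foldl
        (fun d p => if d.contains p.2 then d else d.insert p.2 (p.1 + 1)) d).getD k (-1) =
      if d.contains k then d.getD k (-1)
      else if k ∈ ds then firstPos k ds i else -1 := by
  intro ds
  induction ds with
  | nil =>
    intro d i
    simp only [PySem.List.enumerate_nil, List.foldl_nil]
    by_cases hc : d.contains k
    · simp [hc]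
    · rw [PySem.Dict.getD_of_not_contains]
      · simp [hc]
      · simpa using hc
  | cons n rest ih =>
    intro d i
    rw [PySem.List.enumerate_cons, List.foldl_cons, ih]
    by_cases hc : d.contains k
    · -- existing entry is never overwritten
      by_cases hn : d.contains n
      · simp [hn, hc]
      · have hnk : n ≠ k := by intro h; rw [h] at hn; exact absurd hc (by simp [hn])
        simp [hn, hc, PySem.Dict.contains_insert, PySem.Dict.getD_insert, Ne.symm hnk]
    · by_cases hn : n = k
      · subst hn
        simp [hc, PySem.Dict.contains_insert_self, PySem.Dict.getD_insert_self, firstPos]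
      · have hck : ∀ d' : PySem.Dict Int Int, d'.contains k = d.contains k →
            (if d'.contains k then d'.getD k (-1)
              else if k ∈ rest then firstPos k rest (i + 1) else -1) =
            (if k ∈ rest then firstPos k rest (i + 1) else -1) := by
          intro d' h; rw [h]; simp [hc]
        by_cases hdn : d.contains n
        · simp only [hdn, if_true]
          rw [hck d rfl]
          simp [hc, List.mem_cons, hn, firstPos, Ne.symm hn]
        · simp only [hdn, Bool.false_eq_true, if_false]
          rw [hck (d.insert n (i + 1)) (by simp [PySem.Dict.contains_insert, Ne.symm hn])]
          simp [hc, List.mem_cons, hn, firstPos, Ne.symm hn]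

lemma solution_eq_alt (num k : Int) : solution num k = solution_alt num k := by
  unfold solution solution_alt
  have hne := digitsOf_ne_nil num
  generalize hds : digitsOf num = ds at hne ⊢
  rw [fold_first_getD k ds PySem.Dict.empty 0]
  simp only [PySem.Dict.contains_empty, Bool.false_eq_true, if_false]
  by_cases hmem : k ∈ ds
  · have hk : ds.contains k = true := by simpa using hmem
    rw [solutionGo_eq_firstPos ds k hk ds 0 hmem]
    simp [hmem]
  · have hk : ds.contains k = false := by simpa using hmem
    obtain ⟨n, rest, rfl⟩ := List.exists_cons_of_ne_nil hne
    have hm' : ¬ (k = n ∨ k ∈ rest) := by simpa using hmem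
    simp [solutionGo, hm']

-- ===== VERDICT (by name: the statement is the Claim_ definition above) =====
theorem solution_spec : Claim_equal_solution := by
  intro num k _ _
  unfold Spec_solution
  exact solution_eq_alt num k
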